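-- pv_equiv track=rewrite | github.com/Desire-2/TalentSphere | backend/src/routes/recommendations.py | are_similar_employment_types
-- ===== SOURCE A (Python) =====
-- def are_similar_employment_types(type1, type2):
--     """Check if employment types are similar"""
--     similar_groups = [
--         {'full-time', 'full_time'},
--         {'part-time', 'part_time'},
--         {'contract', 'freelance', 'temporary'},
--         {'internship', 'co-op'}
--     ]
--
--     if not type1 or not type2:
--         return False
--
--     type1_lower = type1.lower().replace('-', '_')
--     type2_lower = type2.lower().replace('-', '_')
--
--     for group in similar_groups:
--         if type1_lower in group and type2_lower in group:
--             return True
--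
--     return False
-- ===== SOURCE B (Python) =====
-- _SIMILAR_GROUPS = [
--     {'full-time', 'full_time'},
--     {'part-time', 'part_time'},
--     {'contract', 'freelance', 'temporary'},
--     {'internship', 'co-op'}
-- ]
--
-- _TOKEN_TO_GROUP = {}
-- for _i, _g in enumerate(_SIMILAR_GROUPS):
--     for _t in _g:
--         _TOKEN_TO_GROUP[_t] = _i
--
--
-- def are_similar_employment_types(type1, type2):
--     """Check if employment types are similar (inverse-index lookup)."""
--     if not type1 or not type2:
--         return False
--     g1 = _TOKEN_TO_GROUP.get(type1.lower().replace('-', '_'))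
--     g2 = _TOKEN_TO_GROUP.get(type2.lower().replace('-', '_'))
--     return g1 is not None and g2 is not None and g1 == g2
-- ===== Notes on version B (the rewrite author's own statement) =====
-- stated objective: idiomatic
-- what changed: Replaces the per-call loop over a list of sets with a token-to-group-index dict built once at module load; the call just looks both normalized strings up and compares group indices.
import Mathlib
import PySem

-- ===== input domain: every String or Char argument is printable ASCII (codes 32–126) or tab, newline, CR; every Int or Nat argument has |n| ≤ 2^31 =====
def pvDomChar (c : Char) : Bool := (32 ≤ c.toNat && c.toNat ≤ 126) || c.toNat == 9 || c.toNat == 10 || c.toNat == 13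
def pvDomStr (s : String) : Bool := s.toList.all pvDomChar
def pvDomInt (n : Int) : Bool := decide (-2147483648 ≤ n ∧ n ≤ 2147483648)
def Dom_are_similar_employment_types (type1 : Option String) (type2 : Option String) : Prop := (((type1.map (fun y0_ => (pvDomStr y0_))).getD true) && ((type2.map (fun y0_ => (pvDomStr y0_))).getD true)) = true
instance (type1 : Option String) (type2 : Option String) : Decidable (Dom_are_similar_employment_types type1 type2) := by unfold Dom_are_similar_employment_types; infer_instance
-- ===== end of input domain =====

-- B replaces A's per-call scan over a list of similarity sets by a token→group-index
-- dictionary built once; each call does two lookups and compares the indices (idiomatic).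

-- ===== PORT A =====
def pvGroupsA : List (PySem.Set String) :=
  [PySem.Set.ofList ["full-time", "full_time"],
   PySem.Set.ofList ["part-time", "part_time"],
   PySem.Set.ofList ["contract", "freelance", "temporary"],
   PySem.Set.ofList ["internship", "co-op"]]

-- the 'for group in similar_groups' loop with its early return
def pvLoopA : List (PySem.Set String) → String → String → Bool
  | [], _, _ => false
  | g :: rest, t1, t2 =>
    if PySem.Set.contains g t1 && PySem.Set.contains g t2 then true
    else pvLoopA rest t1 t2

def are_similar_employment_types (type1 : Option String) (type2 : Option String) : Bool :=
  match type1, type2 with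
  | some t1, some t2 =>
    if t1 = "" || t2 = "" then false
    else
      let t1_lower := PySem.Str.replace (PySem.Str.lower t1) "-" "_"
      let t2_lower := PySem.Str.replace (PySem.Str.lower t2) "-" "_"
      pvLoopA pvGroupsA t1_lower t2_lower
  | _, _ => false

-- ===== PORT B =====
def pvGroupsB : List (PySem.Set String) :=
  [PySem.Set.ofList ["full-time", "full_time"],
   PySem.Set.ofList ["part-time", "part_time"],
   PySem.Set.ofList ["contract", "freelance", "temporary"],
   PySem.Set.ofList ["internship", "co-op"]]

-- the module-level 'for _i, _g in enumerate(...): for _t in _g: d[_t] = _i' build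
def pvTokenToGroup : PySem.Dict String Int :=
  (PySem.List.enumerate pvGroupsB).foldl
    (fun d p => p.2.foldl (fun d t => d.insert t p.1) d) PySem.Dict.empty

def are_similar_employment_types_alt (type1 : Option String) (type2 : Option String) : Bool :=
  -- 'if not type1 or not type2: return False'
  match type1 with
  | none => false
  | some t1 =>
    match type2 with
    | none => false
    | some t2 =>
      if t1 = "" || t2 = "" then false
      else
        let g1 := pvTokenToGroup.get? (PySem.Str.replace (PySem.Str.lower t1) "-" "_")
        let g2 := pvTokenToGroup.get? (PySem.Str.replace (PySem.Str.lower t2) "-" "_")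
        -- 'g1 is not None and g2 is not None and g1 == g2'
        g1.isSome && g2.isSome && g1 == g2

-- ===== PRECONDITION & SPEC =====
def Spec_are_similar_employment_types (type1 : Option String) (type2 : Option String) (out : Bool) : Prop := out = are_similar_employment_types_alt type1 type2
instance (type1 : Option String) (type2 : Option String) (out : Bool) : Decidable (Spec_are_similar_employment_types type1 type2 out) := by unfold Spec_are_similar_employment_types; infer_instance

-- ===== CLAIM (what is proved, stated in full; the proofs are below) =====
def Claim_equal_are_similar_employment_types : Prop := ∀ (type1 : Option String) (type2 : Option String), Dom_are_similar_employment_types type1 type2 → Spec_are_similar_employment_types type1 type2 (are_similar_employment_types type1 type2)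

-- ===== LEMMAS AND PROOFS =====

-- group index of a normalized token, as the literal lookup chain of pvTokenToGroup
def pvGidx (s : String) : Option Int :=
  if "full-time" == s then some 0 else if "full_time" == s then some 0
  else if "part-time" == s then some 1 else if "part_time" == s then some 1
  else if "contract" == s then some 2 else if "freelance" == s then some 2
  else if "temporary" == s then some 2
  else if "internship" == s then some 3 else if "co-op" == s then some 3 else none

lemma pvGetTok (s : String) : pvTokenToGroup.get? s = pvGidx s := by
  have h : pvTokenToGroup = PySem.Dict.mk [("full-time", 0), ("full_time", 0), ("part-time", 1),
      ("part_time", 1), ("contract", 2), ("freelance", 2), ("temporary", 2),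
      ("internship", 3), ("co-op", 3)] := by rfl
  rw [h]
  simp only [PySem.Dict.get?_mk_cons, pvGidx]
  rfl

lemma pvGidxCases (s : String) :
    pvGidx s = none ∨ pvGidx s = some 0 ∨ pvGidx s = some 1 ∨ pvGidx s = some 2 ∨ pvGidx s = some 3 := by
  unfold pvGidx
  split_ifs <;> simp

lemma pvMemG1 (b : String) :
    PySem.Set.contains (PySem.Set.ofList ["full-time", "full_time"]) b = (pvGidx b == some 0) := by
  by_cases h1 : b = "full-time" <;> by_cases h2 : b = "full_time" <;>
    simp_all [pvGidx] <;> split_ifs <;> subst_vars <;> simp_all <;> aesop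

lemma pvMemG2 (b : String) :
    PySem.Set.contains (PySem.Set.ofList ["part-time", "part_time"]) b = (pvGidx b == some 1) := by
  by_cases h1 : b = "part-time" <;> by_cases h2 : b = "part_time" <;>
    simp_all [pvGidx] <;> split_ifs <;> subst_vars <;> simp_all

lemma pvMemG3 (b : String) :
    PySem.Set.contains (PySem.Set.ofList ["contract", "freelance", "temporary"]) b = (pvGidx b == some 2) := by
  by_cases h1 : b = "contract" <;> by_cases h2 : b = "freelance" <;> by_cases h3 : b = "temporary" <;>
    simp_all [pvGidx] <;> split_ifs <;> subst_vars <;> simp_all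

lemma pvMemG4 (b : String) :
    PySem.Set.contains (PySem.Set.ofList ["internship", "co-op"]) b = (pvGidx b == some 3) := by
  by_cases h1 : b = "internship" <;> by_cases h2 : b = "co-op" <;>
    simp_all [pvGidx] <;> split_ifs <;> subst_vars <;> simp_all

lemma pvCore (a b : String) :
    pvLoopA pvGroupsA a b =
      (match pvGidx a, pvGidx b with
       | some i, some j => i == j
       | _, _ => false) := by
  simp only [pvGroupsA, pvLoopA, pvMemG1 a, pvMemG2 a, pvMemG3 a, pvMemG4 a,
    pvMemG1 b, pvMemG2 b, pvMemG3 b, pvMemG4 b]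
  rcases pvGidxCases a with ha | ha | ha | ha | ha <;>
    rcases pvGidxCases b with hb | hb | hb | hb | hb <;> simp [ha, hb]

-- ===== VERDICT (by name: the statement is the Claim_ definition above) =====
theorem are_similar_employment_types_spec : Claim_equal_are_similar_employment_types := by
  intro type1 type2 _
  unfold Spec_are_similar_employment_types
  unfold are_similar_employment_types are_similar_employment_types_alt
  match type1, type2 with
  | none, none => rfl
  | none, some _ => rfl
  | some _, none => rfl
  | some t1, some t2 =>
    simp only []
    by_cases h : t1 = "" || t2 = ""
    · simp [h]
    · simp only [h]
      rw [pvCore, pvGetTok, pvGetTok]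
      cases pvGidx (PySem.Str.replace (PySem.Str.lower t1) "-" "_") <;>
        cases pvGidx (PySem.Str.replace (PySem.Str.lower t2) "-" "_") <;> simp
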